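-- pv_equiv track=rewrite | github.com/KMORaza/leetcode-solutions | LeetCode Solutions/1733.py | minimumTeachings
-- ===== SOURCE A (Python) =====
-- from typing import List
--
-- def minimumTeachings(n: int, languages: List[List[int]], friendships: List[List[int]]) -> int:
--     cannot_communicate = set()
--     for f in friendships:
--         if not set(languages[f[0] - 1]).intersection(set(languages[f[1] - 1])):
--             cannot_communicate.add(f[0])
--             cannot_communicate.add(f[1])
--     if not cannot_communicate:
--         return 0
--     language_count = [0] * (n + 1)
--     for person in cannot_communicate:
--         for lang in languages[person - 1]:
--             language_count[lang] += 1
--     return len(cannot_communicate) - max(language_count)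
-- ===== SOURCE B (Python) =====
-- from typing import List
--
-- def minimumTeachings(n: int, languages: List[List[int]], friendships: List[List[int]]) -> int:
--     lang_sets = [set(ls) for ls in languages]
--     need = set()
--     for f in friendships:
--         u, v = f[0], f[1]
--         if lang_sets[u - 1].isdisjoint(lang_sets[v - 1]):
--             need.add(u)
--             need.add(v)
--     if not need:
--         return 0
--     best = len(need)
--     for l in range(1, n + 1):
--         best = min(best, sum(1 for p in need if l not in lang_sets[p - 1]))
--     return best
-- ===== Notes on version B (the rewrite author's own statement) =====
-- stated objective: alternative
-- what changed: B precomputes each user's language set and replaces A's language-frequency array plus len-minus-max by a direct scan over candidate languages 1..n that keeps the running minimum of how many cannot-communicate users lack each language.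
-- outside the precondition, e.g. on minimumTeachings(1, [[0], [0], [1]], [[1, 3], [2, 3]]): A returns 1, B returns 2; on minimumTeachings(1, [[1, 1], []], [[1, 2]]): A returns 0, B returns 1
import Mathlib
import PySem

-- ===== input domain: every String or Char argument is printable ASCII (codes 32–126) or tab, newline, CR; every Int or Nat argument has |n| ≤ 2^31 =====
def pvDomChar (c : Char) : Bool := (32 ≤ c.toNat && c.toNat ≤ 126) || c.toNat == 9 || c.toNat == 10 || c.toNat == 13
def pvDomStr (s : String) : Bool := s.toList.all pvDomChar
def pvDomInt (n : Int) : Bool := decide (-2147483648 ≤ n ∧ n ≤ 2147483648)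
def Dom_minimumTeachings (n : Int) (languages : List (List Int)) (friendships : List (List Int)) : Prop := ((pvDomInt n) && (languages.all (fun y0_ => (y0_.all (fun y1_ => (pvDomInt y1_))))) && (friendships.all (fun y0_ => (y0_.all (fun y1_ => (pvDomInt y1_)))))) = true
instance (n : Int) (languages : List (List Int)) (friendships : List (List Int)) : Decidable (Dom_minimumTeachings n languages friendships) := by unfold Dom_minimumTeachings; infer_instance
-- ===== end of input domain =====

-- B replaces A's language-frequency array and len-max by a direct scan over candidate languages 1..n
-- keeping the running minimum of how many cannot-communicate users would need teaching (objective: alternative).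

-- ===== PORT A =====
def minimumTeachings (n : Int) (languages : List (List Int)) (friendships : List (List Int)) : Int :=
  let cannot : PySem.Set Int := friendships.foldl (fun s f =>
    if PySem.Set.inter
        (PySem.Set.ofList (PySem.List.pyGetD languages (PySem.List.pyGetD f 0 0 - 1) []))
        (PySem.Set.ofList (PySem.List.pyGetD languages (PySem.List.pyGetD f 1 0 - 1) [])) = [] then
      PySem.Set.add (PySem.Set.add s (PySem.List.pyGetD f 0 0)) (PySem.List.pyGetD f 1 0)
    else s) PySem.Set.empty
  if cannot = [] then 0
  else
    let counts : List Int := cannot.foldl (fun c person =>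
      (PySem.List.pyGetD languages (person - 1) []).foldl
        (fun c lang => PySem.List.pySetD c lang (PySem.List.pyGetD c lang 0 + 1)) c)
      (List.replicate (n + 1).toNat 0)
    (cannot.length : Int) - ((PySem.List.max? counts (fun x => x)).getD 0)

-- ===== PORT B =====
def minimumTeachings_alt (n : Int) (languages : List (List Int)) (friendships : List (List Int)) : Int :=
  let langSets : List (PySem.Set Int) := languages.map PySem.Set.ofList
  let need : PySem.Set Int := friendships.foldl (fun s f =>
    if PySem.Set.isdisjoint
        (PySem.List.pyGetD langSets (PySem.List.pyGetD f 0 0 - 1) [])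
        (PySem.List.pyGetD langSets (PySem.List.pyGetD f 1 0 - 1) []) then
      PySem.Set.add (PySem.Set.add s (PySem.List.pyGetD f 0 0)) (PySem.List.pyGetD f 1 0)
    else s) PySem.Set.empty
  if need = [] then 0
  else
    (PySem.List.pyRange 1 (n + 1) 1).foldl (fun best l =>
      min best ((need.countP (fun p =>
        !(PySem.Set.contains (PySem.List.pyGetD langSets (p - 1) []) l)) : Nat) : Int))
      ((need.length : Nat) : Int)

-- ===== PRECONDITION & SPEC =====
-- the language list of user u (users are numbered from 1; Python's negative-index wraparound)
def pvUserLangs (languages : List (List Int)) (u : Int) : List Int := PySem.List.pyGetD languages (u - 1) []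
-- a well-formed language list: duplicate-free ids from 1..n
def pvGoodLangs (n : Int) (ls : List Int) : Prop := ls.Nodup ∧ ∀ l ∈ ls, 1 ≤ l ∧ l ≤ n
-- Pre_ requires: friendship entries of length ≥ 2 whose user ids index languages without IndexError,
-- and, for every friendship whose two users share no language (the only users A ever counts), 0 ≤ n
-- and duplicate-free language lists with ids in 1..n for both users. Outside it A either raises
-- (IndexError, max of an empty list) or returns a value that hinges on its spurious language-0
-- counting slot, on negative-index wraparound into the count array, or on counting a duplicated
-- language id twice — artefacts of A's frequency-array implementation on malformed input.
def Pre_minimumTeachings (n : Int) (languages : List (List Int)) (friendships : List (List Int)) : Prop :=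
  (∀ f ∈ friendships, 2 ≤ f.length ∧
    PySem.Raise.InRange languages.length (f.getD 0 0 - 1) ∧
    PySem.Raise.InRange languages.length (f.getD 1 0 - 1)) ∧
  (∀ f ∈ friendships,
    (∀ x ∈ pvUserLangs languages (f.getD 0 0), x ∉ pvUserLangs languages (f.getD 1 0)) →
    0 ≤ n ∧ pvGoodLangs n (pvUserLangs languages (f.getD 0 0)) ∧
      pvGoodLangs n (pvUserLangs languages (f.getD 1 0)))
instance (n : Int) (languages : List (List Int)) (friendships : List (List Int)) : Decidable (Pre_minimumTeachings n languages friendships) := by unfold Pre_minimumTeachings pvGoodLangs PySem.Raise.InRange; infer_instance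

def pvWitness_minimumTeachings : Int × List (List Int) × List (List Int) := (2, [[1], [2]], [[1, 2]])

def Spec_minimumTeachings (n : Int) (languages : List (List Int)) (friendships : List (List Int)) (out : Int) : Prop := out = minimumTeachings_alt n languages friendships
instance (n : Int) (languages : List (List Int)) (friendships : List (List Int)) (out : Int) : Decidable (Spec_minimumTeachings n languages friendships out) := by unfold Spec_minimumTeachings; infer_instance

-- ===== CLAIM (what is proved, stated in full; the proofs are below) =====
def Claim_equal_minimumTeachings : Prop := ∀ (n : Int) (languages : List (List Int)) (friendships : List (List Int)), Dom_minimumTeachings n languages friendships → Pre_minimumTeachings n languages friendships → Spec_minimumTeachings n languages friendships (minimumTeachings n languages friendships)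

-- ===== LEMMAS AND PROOFS =====

lemma inter_nil_iff_disjoint (s t : List Int) :
    (PySem.Set.inter s t = []) ↔ PySem.Set.isdisjoint s t = true := by
  simp [PySem.Set.inter, PySem.Set.isdisjoint, List.filter_eq_nil_iff]

lemma need_eq_cannot (languages friendships : List (List Int)) :
    friendships.foldl (fun s f =>
      if PySem.Set.isdisjoint
          (PySem.List.pyGetD (languages.map PySem.Set.ofList) (PySem.List.pyGetD f 0 0 - 1) [])
          (PySem.List.pyGetD (languages.map PySem.Set.ofList) (PySem.List.pyGetD f 1 0 - 1) []) then
        PySem.Set.add (PySem.Set.add s (PySem.List.pyGetD f 0 0)) (PySem.List.pyGetD f 1 0)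
      else s) PySem.Set.empty
    = friendships.foldl (fun s f =>
      if PySem.Set.inter
          (PySem.Set.ofList (PySem.List.pyGetD languages (PySem.List.pyGetD f 0 0 - 1) []))
          (PySem.Set.ofList (PySem.List.pyGetD languages (PySem.List.pyGetD f 1 0 - 1) [])) = [] then
        PySem.Set.add (PySem.Set.add s (PySem.List.pyGetD f 0 0)) (PySem.List.pyGetD f 1 0)
      else s) PySem.Set.empty := by
  apply PySem.List.foldl_congr_mem
  intro acc f _
  have hmap : ∀ i : Int, PySem.List.pyGetD (languages.map PySem.Set.ofList) i ([] : List Int) =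
      PySem.Set.ofList (PySem.List.pyGetD languages i []) := by
    intro i
    have h := PySem.List.pyGetD_map PySem.Set.ofList languages i []
    simpa [show PySem.Set.ofList ([] : List Int) = [] from rfl] using h
  simp only [hmap, ← inter_nil_iff_disjoint]

lemma cannot_invariant (Q : Int → Prop) (fs : List (List Int))
    (cond : List Int → Prop) [DecidablePred cond] (s : PySem.Set Int)
    (hs : s.Nodup) (hq : ∀ p ∈ s, Q p)
    (hf : ∀ f ∈ fs, cond f → Q (PySem.List.pyGetD f 0 0) ∧ Q (PySem.List.pyGetD f 1 0)) :
    (fs.foldl (fun s f =>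
      if cond f then PySem.Set.add (PySem.Set.add s (PySem.List.pyGetD f 0 0)) (PySem.List.pyGetD f 1 0)
      else s) s).Nodup ∧
    ∀ p ∈ (fs.foldl (fun s f =>
      if cond f then PySem.Set.add (PySem.Set.add s (PySem.List.pyGetD f 0 0)) (PySem.List.pyGetD f 1 0)
      else s) s), Q p := by
  induction fs generalizing s with
  | nil => exact ⟨hs, hq⟩
  | cons f fs ih =>
    simp only [List.foldl_cons]
    by_cases hc : cond f
    · simp only [if_pos hc]
      refine ih _ (PySem.Set.nodup_add _ _ (PySem.Set.nodup_add _ _ hs)) ?_ (fun g hg => hf g (by simp [hg]))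
      intro p hp
      rcases (PySem.Set.mem_add _ _ _).1 hp with hp' | hp'
      · rcases (PySem.Set.mem_add _ _ _).1 hp' with hp'' | hp''
        · exact hq p hp''
        · exact hp'' ▸ (hf f (by simp) hc).1
      · exact hp' ▸ (hf f (by simp) hc).2
    · simp only [if_neg hc]
      exact ih _ hs hq (fun g hg => hf g (by simp [hg]))

lemma sum_count_eq_countP (g : Int → List Int) (C : List Int) (j : Int)
    (h : ∀ p ∈ C, (g p).Nodup) :
    (C.map (fun p => ((g p).count j : Int))).sum = ((C.countP (fun p => (g p).contains j) : Nat) : Int) := by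
  induction C with
  | nil => simp
  | cons p C ih =>
    have hrec := ih (fun q hq => h q (by simp [hq]))
    by_cases hm : j ∈ g p
    · have h1 : (g p).count j = 1 := List.count_eq_one_of_mem (h p (by simp)) hm
      simp [h1, hrec, hm]
      omega
    · have h0 : (g p).count j = 0 := List.count_eq_zero.mpr hm
      simp [h0, hrec, hm]

lemma min_fold_eq_len_sub_max_fold (g : Int → Int) (L : List Int) (len : Int)
    (hg : ∀ l, 0 ≤ g l ∧ g l ≤ len) :
    ∀ m : Int, 0 ≤ m → m ≤ len →
      L.foldl (fun best l => min best (len - g l)) (len - m)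
        = len - L.foldl (fun mm l => max mm (g l)) m := by
  induction L with
  | nil => intro m _ _; simp
  | cons l L ih =>
    intro m hm0 hmlen
    have hgl := hg l
    have hstep : min (len - m) (len - g l) = len - max m (g l) := by omega
    simp only [List.foldl_cons, hstep]
    exact ih (max m (g l)) (by omega) (by omega)

lemma inner_fold (L : List Int) : ∀ (c : List Int), (∀ l ∈ L, 0 ≤ l ∧ l < (c.length : Int)) →
    (L.foldl (fun c lang => PySem.List.pySetD c lang (PySem.List.pyGetD c lang 0 + 1)) c).length = c.length ∧
    ∀ j : Nat, j < c.length →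
      (L.foldl (fun c lang => PySem.List.pySetD c lang (PySem.List.pyGetD c lang 0 + 1)) c).getD j 0
        = c.getD j 0 + (L.count (j : Int) : Int) := by
  induction L with
  | nil => intro c _; simp
  | cons l L ih =>
    intro c hL
    obtain ⟨hl0, hllt⟩ := hL l (by simp)
    have hset : PySem.List.pySetD c l (PySem.List.pyGetD c l 0 + 1)
        = c.set l.toNat (PySem.List.pyGetD c l 0 + 1) :=
      PySem.List.pySetD_of_nonneg _ _ hl0
    have hlen' : (c.set l.toNat (PySem.List.pyGetD c l 0 + 1)).length = c.length := by
      simp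
    have hrec := ih (c.set l.toNat (PySem.List.pyGetD c l 0 + 1))
      (fun x hx => by rw [hlen']; exact hL x (by simp [hx]))
    simp only [List.foldl_cons, hset]
    refine ⟨by rw [hrec.1, hlen'], ?_⟩
    intro j hj
    rw [hrec.2 j (by omega)]
    have hgd : (c.set l.toNat (PySem.List.pyGetD c l 0 + 1)).getD j 0
        = c.getD j 0 + (if (j : Int) = l then 1 else 0) := by
      by_cases hjl : j = l.toNat
      · subst hjl
        have hlt : l.toNat < c.length := by omega
        rw [List.getD_eq_getElem _ _ (by simpa using hlt), List.getElem_set_self (h := by simpa using hlt),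
          List.getD_eq_getElem _ _ hlt, PySem.List.pyGetD_eq_getElem c 0 hl0 hllt]
        simp [Int.toNat_of_nonneg hl0]
      · have hne : (j : Int) ≠ l := by omega
        rw [List.getD_eq_getElem _ _ (by simpa using hj), List.getElem_set_ne (by omega) (hj := by simpa using hj),
          List.getD_eq_getElem _ _ hj]
        simp [hne]
    rw [hgd]
    have hcnt : ((l :: L).count (j : Int) : Int) = (L.count (j : Int) : Int) + (if (j : Int) = l then 1 else 0) := by
      by_cases hjl : (j : Int) = l <;> simp [List.count_cons, hjl] <;> omega
    rw [hcnt]; ring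

lemma outer_fold (ls : Int → List Int) (P : List Int) : ∀ (c : List Int),
    (∀ p ∈ P, ∀ l ∈ ls p, 0 ≤ l ∧ l < (c.length : Int)) →
    (P.foldl (fun c p => (ls p).foldl (fun c lang => PySem.List.pySetD c lang (PySem.List.pyGetD c lang 0 + 1)) c) c).length = c.length ∧
    ∀ j : Nat, j < c.length →
      (P.foldl (fun c p => (ls p).foldl (fun c lang => PySem.List.pySetD c lang (PySem.List.pyGetD c lang 0 + 1)) c) c).getD j 0
        = c.getD j 0 + (P.map (fun p => ((ls p).count (j : Int) : Int))).sum := by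
  induction P with
  | nil => intro c _; simp
  | cons p P ih =>
    intro c hP
    have hin := inner_fold (ls p) c (hP p (by simp))
    have hrec := ih ((ls p).foldl (fun c lang => PySem.List.pySetD c lang (PySem.List.pyGetD c lang 0 + 1)) c)
      (fun q hq => by rw [hin.1]; exact hP q (by simp [hq]))
    simp only [List.foldl_cons]
    refine ⟨by rw [hrec.1, hin.1], ?_⟩
    intro j hj
    rw [hrec.2 j (by omega), hin.2 j hj]
    simp; ring

lemma countP_split (l : List Int) (p : Int → Bool) :
    l.countP p + l.countP (fun a => !p a) = l.length := by
  induction l with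
  | nil => simp
  | cons a t ih => by_cases h : p a <;> simp [h] <;> omega

lemma pyGetD_map_ofList (languages : List (List Int)) (i : Int) :
    PySem.List.pyGetD (languages.map PySem.Set.ofList) i ([] : List Int) =
      PySem.Set.ofList (PySem.List.pyGetD languages i []) := by
  have h := PySem.List.pyGetD_map PySem.Set.ofList languages i []
  simpa [show PySem.Set.ofList ([] : List Int) = [] from rfl] using h

-- ===== VERDICT (by name: the statement is the Claim_ definition above) =====
theorem minimumTeachings_spec : Claim_equal_minimumTeachings := by
  intro n languages friendships _hdom hpre
  obtain ⟨hfr, hclash⟩ := hpre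
  simp only [Spec_minimumTeachings, minimumTeachings, minimumTeachings_alt]
  rw [need_eq_cannot]
  set C := friendships.foldl (fun s f =>
    if PySem.Set.inter
        (PySem.Set.ofList (PySem.List.pyGetD languages (PySem.List.pyGetD f 0 0 - 1) []))
        (PySem.Set.ofList (PySem.List.pyGetD languages (PySem.List.pyGetD f 1 0 - 1) [])) = [] then
      PySem.Set.add (PySem.Set.add s (PySem.List.pyGetD f 0 0)) (PySem.List.pyGetD f 1 0)
    else s) PySem.Set.empty with hCdef
  by_cases hC0 : C = []
  · simp [hC0]
  · simp only [if_neg hC0]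
    have hfq : ∀ f ∈ friendships,
        (PySem.Set.inter
          (PySem.Set.ofList (PySem.List.pyGetD languages (PySem.List.pyGetD f 0 0 - 1) []))
          (PySem.Set.ofList (PySem.List.pyGetD languages (PySem.List.pyGetD f 1 0 - 1) [])) = []) →
        ((fun p => (PySem.List.pyGetD languages (p - 1) ([] : List Int)).Nodup ∧
            (∀ l ∈ PySem.List.pyGetD languages (p - 1) ([] : List Int), 1 ≤ l ∧ l ≤ n) ∧ 0 ≤ n)
          (PySem.List.pyGetD f 0 0)) ∧
        ((fun p => (PySem.List.pyGetD languages (p - 1) ([] : List Int)).Nodup ∧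
            (∀ l ∈ PySem.List.pyGetD languages (p - 1) ([] : List Int), 1 ≤ l ∧ l ≤ n) ∧ 0 ≤ n)
          (PySem.List.pyGetD f 1 0)) := by
      intro f hf hc
      have e0 : PySem.List.pyGetD f 0 0 = f.getD 0 0 := by simp [pysem]
      have e1 : PySem.List.pyGetD f 1 0 = f.getD 1 0 := by simp [pysem]
      rw [e0, e1] at hc ⊢
      have hdisj : ∀ x ∈ pvUserLangs languages (f.getD 0 0), x ∉ pvUserLangs languages (f.getD 1 0) := by
        simpa [PySem.Set.inter, pvUserLangs] using hc
      obtain ⟨hn', hg0, hg1⟩ := hclash f hf hdisj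
      simp only [pvGoodLangs, pvUserLangs] at hg0 hg1
      exact ⟨⟨hg0.1, hg0.2, hn'⟩, ⟨hg1.1, hg1.2, hn'⟩⟩
    have hinv := cannot_invariant
      (fun p => (PySem.List.pyGetD languages (p - 1) ([] : List Int)).Nodup ∧
        (∀ l ∈ PySem.List.pyGetD languages (p - 1) ([] : List Int), 1 ≤ l ∧ l ≤ n) ∧ 0 ≤ n)
      friendships
      (fun f => PySem.Set.inter
        (PySem.Set.ofList (PySem.List.pyGetD languages (PySem.List.pyGetD f 0 0 - 1) []))
        (PySem.Set.ofList (PySem.List.pyGetD languages (PySem.List.pyGetD f 1 0 - 1) [])) = [])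
      PySem.Set.empty List.nodup_nil (by intro p hp; simp [PySem.Set.empty] at hp) hfq
    simp only [] at hinv
    rw [← hCdef] at hinv
    obtain ⟨hNd, hPb⟩ := hinv
    obtain ⟨p0, hp0⟩ := List.exists_mem_of_ne_nil C hC0
    have hn : 0 ≤ n := (hPb p0 hp0).2.2
    have hlsfacts : ∀ p ∈ C, (PySem.List.pyGetD languages (p - 1) ([] : List Int)).Nodup ∧
        ∀ l ∈ PySem.List.pyGetD languages (p - 1) ([] : List Int), 1 ≤ l ∧ l ≤ n :=
      fun p hp => ⟨(hPb p hp).1, (hPb p hp).2.1⟩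
    have hboundc : ∀ p ∈ C, ∀ l ∈ PySem.List.pyGetD languages (p - 1) ([] : List Int),
        0 ≤ l ∧ l < ((List.replicate (n + 1).toNat (0 : Int)).length : Int) := by
      intro p hp l hl
      obtain ⟨-, hb⟩ := hlsfacts p hp
      obtain ⟨hl1, hl2⟩ := hb l hl
      simp only [List.length_replicate]
      omega
    have hout := outer_fold (fun p => PySem.List.pyGetD languages (p - 1) []) C _ hboundc
    simp only [] at hout
    have hcounts : C.foldl (fun c person =>
        (PySem.List.pyGetD languages (person - 1) []).foldl
          (fun c lang => PySem.List.pySetD c lang (PySem.List.pyGetD c lang 0 + 1)) c)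
        (List.replicate (n + 1).toNat 0)
        = (PySem.List.pyRange 0 (n + 1)).map
            (fun l => (C.map (fun p => ((PySem.List.pyGetD languages (p - 1) []).count l : Int))).sum) := by
      apply List.ext_getElem
      · rw [hout.1]
        simp [PySem.List.length_pyRange_one]
      · intro j h1 h2
        have hj : j < (n + 1).toNat := by
          rw [hout.1] at h1
          simpa using h1
        rw [← List.getD_eq_getElem _ 0 h1, hout.2 j (by simpa using hj),
          List.getElem_map, PySem.List.getElem_pyRange_one]
        rw [List.getD_replicate _ hj]
        simp
    rw [hcounts, PySem.List.pyRange_one_cons (by omega : (0 : Int) < n + 1), List.map_cons,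
      PySem.List.max?_id_cons, Option.getD_some, List.foldl_map]
    have hS0 : (C.map (fun p => ((PySem.List.pyGetD languages (p - 1) []).count (0 : Int) : Int))).sum = 0 := by
      apply List.sum_eq_zero
      intro x hx
      simp only [List.mem_map] at hx
      obtain ⟨p, hp, rfl⟩ := hx
      have hb := (hlsfacts p hp).2
      have h0 : (0 : Int) ∉ PySem.List.pyGetD languages (p - 1) [] := by
        intro hmem
        have := hb 0 hmem
        omega
      simp [List.count_eq_zero.mpr h0]
    rw [hS0]
    have hSP : ∀ l : Int,
        (C.map (fun p => ((PySem.List.pyGetD languages (p - 1) []).count l : Int))).sum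
          = ((C.countP (fun p => (PySem.List.pyGetD languages (p - 1) []).contains l) : Nat) : Int) :=
      fun l => sum_count_eq_countP _ C l (fun p hp => (hlsfacts p hp).1)
    have hfun : (fun (best : Int) (l : Int) => min best
          ((C.countP (fun p => !(PySem.Set.contains (PySem.List.pyGetD (languages.map PySem.Set.ofList) (p - 1) []) l)) : Nat) : Int))
        = fun best l => min best ((C.length : Int) -
            (C.map (fun p => ((PySem.List.pyGetD languages (p - 1) []).count l : Int))).sum) := by
      funext best l
      have hpred : (fun p => !(PySem.Set.contains (PySem.List.pyGetD (languages.map PySem.Set.ofList) (p - 1) []) l))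
          = fun p => !((PySem.List.pyGetD languages (p - 1) []).contains l) := by
        funext p
        rw [pyGetD_map_ofList]
        have hce : (PySem.Set.ofList (PySem.List.pyGetD languages (p - 1) [])).contains l
            = (PySem.List.pyGetD languages (p - 1) []).contains l := by
          simp [PySem.Set.contains, PySem.Set.mem_ofList]
        rw [hce]
      rw [hpred, hSP l]
      have hsplit := countP_split C (fun p => (PySem.List.pyGetD languages (p - 1) []).contains l)
      congr 1
      omega
    rw [hfun]
    have hg : ∀ l : Int, 0 ≤ (C.map (fun p => ((PySem.List.pyGetD languages (p - 1) []).count l : Int))).sum ∧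
        (C.map (fun p => ((PySem.List.pyGetD languages (p - 1) []).count l : Int))).sum ≤ (C.length : Int) := by
      intro l
      rw [hSP l]
      have := List.countP_le_length (p := fun p => (PySem.List.pyGetD languages (p - 1) []).contains l) (l := C)
      omega
    have hbridge := min_fold_eq_len_sub_max_fold
      (fun l => (C.map (fun p => ((PySem.List.pyGetD languages (p - 1) []).count l : Int))).sum)
      (PySem.List.pyRange 1 (n + 1)) (C.length : Int) hg 0 le_rfl (by omega)
    rw [sub_zero] at hbridge
    simp only [] at hbridge
    simp only [zero_add]
    rw [hbridge]
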